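-- pv_equiv track=rewrite | github.com/K123AsJ0k1/multi-cloud-hpc-oss-mlops-platform | applications/integration/submitter/backend/functions/platforms/venv.py | format_package_installation
-- ===== SOURCE A (Python) =====
-- def format_package_installation(
--     wanted_packages: any
-- ) -> any:
--     install_separation = []
--     line_packages = ''
--     for package in wanted_packages:
--         if '-f' in package:
--             if 0 < len(line_packages):
--                 install_separation.append(line_packages)
--                 line_packages = ''
--             install_separation.append(package + ' ')
--             continue
--         line_packages += package + ' '
--     if 0 < len(line_packages):
--         install_separation.append(line_packages)
--     return install_separation
-- ===== SOURCE B (Python) =====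
-- def format_package_installation(
--     wanted_packages: any
-- ) -> any:
--     install_separation = []
--     i = 0
--     n = len(wanted_packages)
--     while i < n:
--         if '-f' in wanted_packages[i]:
--             install_separation.append(wanted_packages[i] + ' ')
--             i += 1
--         else:
--             j = i
--             while j < n and '-f' not in wanted_packages[j]:
--                 j += 1
--             install_separation.append(''.join(p + ' ' for p in wanted_packages[i:j]))
--             i = j
--     return install_separation
-- ===== Notes on version B (the rewrite author's own statement) =====
-- stated objective: alternative
-- what changed: Replaced the stateful flush-on-flag accumulator (pending line string flushed before each '-f' entry and at the end) by a run-splitting scan that emits each '-f' package directly and each maximal run of non-flag packages as one joined line.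
import Mathlib
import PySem

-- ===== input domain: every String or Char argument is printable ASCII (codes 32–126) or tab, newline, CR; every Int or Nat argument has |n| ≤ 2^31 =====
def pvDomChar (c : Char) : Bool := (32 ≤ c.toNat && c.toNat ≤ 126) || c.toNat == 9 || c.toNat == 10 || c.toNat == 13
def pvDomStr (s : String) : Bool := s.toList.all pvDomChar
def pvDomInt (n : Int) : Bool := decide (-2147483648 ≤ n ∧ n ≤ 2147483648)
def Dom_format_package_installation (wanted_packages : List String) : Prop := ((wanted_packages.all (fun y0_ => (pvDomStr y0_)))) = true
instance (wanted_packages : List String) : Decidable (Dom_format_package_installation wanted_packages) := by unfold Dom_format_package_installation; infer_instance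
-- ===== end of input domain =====

-- B replaces A's flush-on-flag pending-line loop by a run-splitting scan; same cost, no pending state.

-- ===== PORT A =====
-- The pending line string is kept as List Char (Python string concatenation and len are exact there);
-- it is materialised with String.ofList exactly where A appends it to the result list.
def fpiGo : List String → List String → List Char → List String
  | [], acc, line => if 0 < line.length then acc ++ [String.ofList line] else acc
  | p :: rest, acc, line =>
    if PySem.Str.isIn "-f" p then
      fpiGo rest ((if 0 < line.length then acc ++ [String.ofList line] else acc)
                  ++ [String.ofList (p.toList ++ [' '])]) []
    else
      fpiGo rest acc (line ++ p.toList ++ [' '])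

def format_package_installation (wanted_packages : List String) : List String :=
  fpiGo wanted_packages [] []

-- ===== PORT B =====
-- Source B's outer while: one step per '-f' package or per maximal run of non-flag packages
-- (the inner 'while j < n and ...' scan of a run is the takeWhile/dropWhile pair).
def fpiAltGo : List String → List String
  | [] => []
  | p :: rest =>
    if PySem.Str.isIn "-f" p then
      String.ofList (p.toList ++ [' ']) :: fpiAltGo rest
    else
      String.ofList ((((p :: rest).takeWhile (fun q => !PySem.Str.isIn "-f" q)).map
                    (fun q => q.toList ++ [' '])).flatten)
        :: fpiAltGo ((p :: rest).dropWhile (fun q => !PySem.Str.isIn "-f" q))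
termination_by ws => ws.length
decreasing_by
  · simp
  · rename_i h
    rw [List.dropWhile_cons_of_pos (by simp only [Bool.eq_false_iff.mpr h]; decide)]
    exact Nat.lt_succ_of_le (List.length_dropWhile_le _ _)

def format_package_installation_alt (wanted_packages : List String) : List String :=
  fpiAltGo wanted_packages

-- ===== PRECONDITION & SPEC =====
def Spec_format_package_installation (wanted_packages : List String) (out : List String) : Prop := out = format_package_installation_alt wanted_packages
instance (wanted_packages : List String) (out : List String) : Decidable (Spec_format_package_installation wanted_packages out) := by unfold Spec_format_package_installation; infer_instance

-- ===== CLAIM (what is proved, stated in full; the proofs are below) =====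
def Claim_equal_format_package_installation : Prop := ∀ (wanted_packages : List String), Dom_format_package_installation wanted_packages → Spec_format_package_installation wanted_packages (format_package_installation wanted_packages)

-- ===== LEMMAS AND PROOFS =====

-- the joined characters of the leading non-flag run
def fpiRun (ws : List String) : List Char :=
  ((ws.takeWhile (fun q => !PySem.Str.isIn "-f" q)).map (fun q => q.toList ++ [' '])).flatten

theorem fpiGo_acc (ws : List String) : ∀ (acc : List String) (line : List Char),
    fpiGo ws acc line = acc ++ fpiGo ws [] line := by
  induction ws with
  | nil =>
    intro acc line
    simp only [fpiGo]
    split_ifs <;> simp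
  | cons p rest ih =>
    intro acc line
    by_cases hf : PySem.Str.isIn "-f" p = true
    · simp only [fpiGo, if_pos hf, List.nil_append]
      conv_lhs => rw [ih]
      conv_rhs => rw [ih]
      split_ifs <;> simp
    · simp only [fpiGo, if_neg hf]
      exact ih acc _

theorem fpiRun_cons_neg {p : String} (rest : List String)
    (hf : PySem.Str.isIn "-f" p = true) : fpiRun (p :: rest) = [] := by
  simp only [fpiRun]
  rw [List.takeWhile_cons_of_neg (by simp only [hf]; decide)]
  simp

theorem fpiDrop_cons_neg {p : String} (rest : List String)
    (hf : PySem.Str.isIn "-f" p = true) :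
    (p :: rest).dropWhile (fun q => !PySem.Str.isIn "-f" q) = p :: rest := by
  rw [List.dropWhile_cons_of_neg (by simp only [hf]; decide)]

theorem fpiRun_cons_pos {p : String} (rest : List String)
    (hf : PySem.Str.isIn "-f" p = false) :
    fpiRun (p :: rest) = (p.toList ++ [' ']) ++ fpiRun rest := by
  simp only [fpiRun]
  rw [List.takeWhile_cons_of_pos (by simp only [hf]; decide)]
  simp

theorem fpiDrop_cons_pos {p : String} (rest : List String)
    (hf : PySem.Str.isIn "-f" p = false) :
    (p :: rest).dropWhile (fun q => !PySem.Str.isIn "-f" q)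
      = rest.dropWhile (fun q => !PySem.Str.isIn "-f" q) := by
  rw [List.dropWhile_cons_of_pos (by simp only [hf]; decide)]

-- B's step, written through the leading run
theorem fpiAlt_head (ws : List String) :
    fpiAltGo ws =
      (if fpiRun ws = [] then [] else [String.ofList (fpiRun ws)])
        ++ fpiAltGo (ws.dropWhile (fun q => !PySem.Str.isIn "-f" q)) := by
  cases ws with
  | nil => simp [fpiAltGo, fpiRun]
  | cons p rest =>
    by_cases hf : PySem.Str.isIn "-f" p = true
    · rw [fpiRun_cons_neg rest hf, fpiDrop_cons_neg rest hf]
      simp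
    · have hf0 : PySem.Str.isIn "-f" p = false := by
        cases hb : PySem.Str.isIn "-f" p
        · rfl
        · exact absurd hb hf
      simp only [fpiAltGo, if_neg hf]
      rw [if_neg (by rw [fpiRun_cons_pos rest hf0]; simp)]
      simp only [fpiRun, List.singleton_append]

-- A's loop, characterised by the pending line and the leading run
theorem fpiGo_eq (ws : List String) : ∀ (line : List Char),
    fpiGo ws [] line =
      (if line ++ fpiRun ws = [] then [] else [String.ofList (line ++ fpiRun ws)])
        ++ fpiAltGo (ws.dropWhile (fun q => !PySem.Str.isIn "-f" q)) := by
  induction ws with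
  | nil =>
    intro line
    simp only [fpiGo, fpiRun, List.takeWhile_nil, List.map_nil, List.flatten_nil,
      List.append_nil, List.dropWhile_nil, fpiAltGo]
    cases line <;> simp
  | cons p rest ih =>
    intro line
    by_cases hf : PySem.Str.isIn "-f" p = true
    · rw [fpiRun_cons_neg rest hf, fpiDrop_cons_neg rest hf]
      simp only [fpiGo, if_pos hf, List.nil_append, List.append_nil]
      rw [fpiGo_acc, ih []]
      rw [fpiAlt_head (p :: rest)]
      rw [fpiRun_cons_neg rest hf, fpiDrop_cons_neg rest hf]
      simp only [fpiAltGo, if_pos hf, List.nil_append]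
      rw [← fpiAlt_head rest]
      cases line <;> simp
    · have hf0 : PySem.Str.isIn "-f" p = false := by
        cases hb : PySem.Str.isIn "-f" p
        · rfl
        · exact absurd hb hf
      rw [fpiRun_cons_pos rest hf0, fpiDrop_cons_pos rest hf0]
      simp only [fpiGo, if_neg hf]
      rw [ih (line ++ p.toList ++ [' '])]
      simp only [List.append_assoc]

-- ===== VERDICT (by name: the statement is the Claim_ definition above) =====
theorem format_package_installation_spec : Claim_equal_format_package_installation := by
  intro ws _
  unfold Spec_format_package_installation format_package_installation format_package_installation_alt
  rw [fpiGo_eq ws [], fpiAlt_head ws]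
  simp
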